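-- pv_equiv track=rewrite | github.com/YujiaZhao/vocal_match | test.py | adjust_phoneme_groups
-- ===== SOURCE A (Python) =====
-- def adjust_phoneme_groups(ph_groups, target_count):
--     """
--     调整音素组的数量，使其与目标数量 target_count 对齐。
--     :param ph_groups: 原始的音素组列表（如 [['w', 'o'], ['a', 'i'], ['n', 'i']])
--     :param target_count: 目标音素组数量，与原始音素组数量一致
--     :return: 调整后的音素组列表
--     """
--     adjusted_groups = ph_groups.copy()
--
--     # 如果音素组数量少于目标数量，进行拆分
--     while len(adjusted_groups) < target_count:
--         for i in range(len(adjusted_groups)):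
--             if len(adjusted_groups[i]) > 1:
--                 split_group = adjusted_groups[i]
--                 adjusted_groups[i] = split_group[:1]
--                 adjusted_groups.insert(i + 1, split_group[1:])
--                 break
--
--     # 如果音素组数量多于目标数量，进行合并
--     while len(adjusted_groups) > target_count:
--         for i in range(len(adjusted_groups) - 1):
--             merged_group = adjusted_groups[i] + adjusted_groups[i + 1]
--             adjusted_groups[i] = merged_group
--             del adjusted_groups[i + 1]
--             break
--
--     return adjusted_groups
-- ===== SOURCE B (Python) =====
-- def adjust_phoneme_groups(ph_groups, target_count):
--     n = len(ph_groups)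
--     if target_count > n:
--         # peel singletons off the leftmost splittable groups, one pass
--         d = target_count - n
--         out = []
--         for idx in range(n):
--             g = ph_groups[idx]
--             if d == 0:
--                 out.extend(ph_groups[idx:])
--                 return out
--             if len(g) <= 1:
--                 out.append(g)
--             else:
--                 t = min(d, len(g) - 1)
--                 out.extend([x] for x in g[:t])
--                 out.append(g[t:])
--                 d -= t
--         return out
--     if target_count < n:
--         # merging always collapses the first two groups, so the result is
--         # the first n-target_count+1 groups flattened, then the rest
--         k = n - target_count + 1
--         merged = [p for g in ph_groups[:k] for p in g]
--         return [merged] + ph_groups[k:]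
--     return ph_groups.copy()
-- ===== Notes on version B (the rewrite author's own statement) =====
-- stated objective: faster
-- what changed: Replaces A's repeated while-loop simulation (each iteration rescanning the list to split one group or merge the first two) by closed forms computed in one pass: splitting peels a prefix of the phonemes into singleton groups, merging flattens the leftmost n-target+1 groups.
import Mathlib
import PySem

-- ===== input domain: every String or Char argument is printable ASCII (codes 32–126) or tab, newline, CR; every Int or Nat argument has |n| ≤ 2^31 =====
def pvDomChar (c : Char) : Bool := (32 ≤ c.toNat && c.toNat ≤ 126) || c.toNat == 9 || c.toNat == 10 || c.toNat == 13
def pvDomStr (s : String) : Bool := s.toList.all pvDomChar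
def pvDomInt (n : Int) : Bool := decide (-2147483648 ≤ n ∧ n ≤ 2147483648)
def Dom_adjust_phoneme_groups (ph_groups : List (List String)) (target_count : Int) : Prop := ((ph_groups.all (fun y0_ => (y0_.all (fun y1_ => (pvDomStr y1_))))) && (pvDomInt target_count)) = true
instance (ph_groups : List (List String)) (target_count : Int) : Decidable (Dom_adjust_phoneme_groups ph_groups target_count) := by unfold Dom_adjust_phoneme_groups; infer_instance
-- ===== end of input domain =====

-- B replaces A's O(Δ·n) split/merge simulation loops by one O(P) pass
-- (peel a prefix into singletons / flatten the leftmost prefix); return value only.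

-- ===== PORT A =====
-- A's inner 'for … break' of the split loop: find the first group with len > 1
-- and split its head off; none = no such group (A would loop forever there).
def pvSplitOnce : List (List String) → Option (List (List String))
  | [] => none
  | g :: rest =>
    if 1 < g.length then some (g.take 1 :: g.drop 1 :: rest)
    else (pvSplitOnce rest).map (fun r => g :: r)

-- A's first while loop; fuel bounds the iterations (each one grows the list by
-- one, so target_count.toNat iterations always suffice when A terminates).
def pvSplitLoop : Nat → List (List String) → Int → List (List String)
  | 0, gs, _ => gs
  | fuel + 1, gs, t =>
    if (gs.length : Int) < t then
      match pvSplitOnce gs with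
      | some gs' => pvSplitLoop fuel gs' t
      | none => gs
    else gs

-- A's second while loop: merge the first two groups while too many.
def pvMergeLoop : Nat → List (List String) → Int → List (List String)
  | 0, gs, _ => gs
  | fuel + 1, gs, t =>
    if t < (gs.length : Int) then
      match gs with
      | g1 :: g2 :: rest => pvMergeLoop fuel ((g1 ++ g2) :: rest) t
      | _ => gs
    else gs

def adjust_phoneme_groups (ph_groups : List (List String)) (target_count : Int) : List (List String) :=
  pvMergeLoop (pvSplitLoop target_count.toNat ph_groups target_count).length
    (pvSplitLoop target_count.toNat ph_groups target_count) target_count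

-- ===== PORT B =====
-- Source B's single left-to-right pass with the remaining-split budget d.
def pvPeel : Nat → List (List String) → List (List String)
  | _, [] => []
  | d, g :: rest =>
    if d = 0 then g :: rest
    else if g.length ≤ 1 then g :: pvPeel d rest
    else
      let t := min d (g.length - 1)
      (g.take t).map (fun x => [x]) ++ [g.drop t] ++ pvPeel (d - t) rest

def adjust_phoneme_groups_alt (ph_groups : List (List String)) (target_count : Int) : List (List String) :=
  if (ph_groups.length : Int) < target_count then
    pvPeel (target_count - (ph_groups.length : Int)).toNat ph_groups
  else if target_count < (ph_groups.length : Int) then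
    ((ph_groups.take ((ph_groups.length : Int) - target_count + 1).toNat).flatten)
      :: ph_groups.drop ((ph_groups.length : Int) - target_count + 1).toNat
  else ph_groups

-- ===== PRECONDITION & SPEC =====
-- spare capacity for splitting: Σ (len g − 1)⁺ over the groups
def pvSlack (gs : List (List String)) : Nat := (gs.map (fun g => g.length - 1)).sum

-- Pre_ = exactly where A terminates: A loops forever on [] with target ≠ 0, on
-- target ≤ 0 with a nonempty list, and on target > len + slack (nothing left to split).
def Pre_adjust_phoneme_groups (ph_groups : List (List String)) (target_count : Int) : Prop :=
  (ph_groups = [] ∧ target_count = 0) ∨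
  (ph_groups ≠ [] ∧ 1 ≤ target_count ∧ target_count ≤ (ph_groups.length : Int) + (pvSlack ph_groups : Int))
instance (ph_groups : List (List String)) (target_count : Int) : Decidable (Pre_adjust_phoneme_groups ph_groups target_count) := by unfold Pre_adjust_phoneme_groups; infer_instance

def pvWitness_adjust_phoneme_groups : List (List String) × Int := ([["w", "o"], ["a", "i"]], 3)

def Spec_adjust_phoneme_groups (ph_groups : List (List String)) (target_count : Int) (out : List (List String)) : Prop := out = adjust_phoneme_groups_alt ph_groups target_count
instance (ph_groups : List (List String)) (target_count : Int) (out : List (List String)) : Decidable (Spec_adjust_phoneme_groups ph_groups target_count out) := by unfold Spec_adjust_phoneme_groups; infer_instance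

-- ===== CLAIM (what is proved, stated in full; the proofs are below) =====
def Claim_equal_adjust_phoneme_groups : Prop := ∀ (ph_groups : List (List String)) (target_count : Int), Dom_adjust_phoneme_groups ph_groups target_count → Pre_adjust_phoneme_groups ph_groups target_count → Spec_adjust_phoneme_groups ph_groups target_count (adjust_phoneme_groups ph_groups target_count)

-- ===== LEMMAS AND PROOFS =====
theorem pvPeel_zero (gs : List (List String)) : pvPeel 0 gs = gs := by
  cases gs <;> simp [pvPeel]

theorem pvPeel_singleton (d : Nat) (g : List String) (rest : List (List String))
    (h : g.length ≤ 1) : pvPeel d (g :: rest) = g :: pvPeel d rest := by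
  cases d with
  | zero => simp [pvPeel, pvPeel_zero]
  | succ e => simp [pvPeel, h]

-- spending one unit of budget on a multi-phoneme head peels one singleton
theorem pvPeel_step (d : Nat) (a : String) (gtl : List String) (rest : List (List String))
    (hm : 1 ≤ gtl.length) :
    pvPeel (d + 1) ((a :: gtl) :: rest) = [a] :: pvPeel d (gtl :: rest) := by
  have hlen : ¬ (a :: gtl).length ≤ 1 := by simp only [List.length_cons]; omega
  have ht : min (d + 1) ((a :: gtl).length - 1) = min d (gtl.length - 1) + 1 := by
    simp only [List.length_cons, Nat.add_sub_cancel, Nat.min_def]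
    split_ifs <;> omega
  rw [show pvPeel (d + 1) ((a :: gtl) :: rest) =
      (((a :: gtl).take (min (d + 1) ((a :: gtl).length - 1))).map (fun x => [x]))
        ++ [(a :: gtl).drop (min (d + 1) ((a :: gtl).length - 1))]
        ++ pvPeel (d + 1 - min (d + 1) ((a :: gtl).length - 1)) rest from by
    simp [pvPeel]
    intro h
    subst h
    simp at hm]
  rw [ht, List.take_succ_cons, List.drop_succ_cons,
      show d + 1 - (min d (gtl.length - 1) + 1) = d - min d (gtl.length - 1) from by omega]
  cases d with
  | zero => simp [pvPeel_zero]
  | succ e =>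
    by_cases hm1 : gtl.length ≤ 1
    · simp [pvPeel, hm1]
    · rw [show pvPeel (e + 1) (gtl :: rest) =
          ((gtl.take (min (e + 1) (gtl.length - 1))).map (fun x => [x]))
            ++ [gtl.drop (min (e + 1) (gtl.length - 1))]
            ++ pvPeel (e + 1 - min (e + 1) (gtl.length - 1)) rest from by
        simp [pvPeel, hm1]]
      simp

-- one successful split of A corresponds to spending one unit of B's budget
theorem pvPeel_splitOnce (gs gs' : List (List String)) (h : pvSplitOnce gs = some gs') (d : Nat) :
    pvPeel (d + 1) gs = pvPeel d gs' := by
  induction gs generalizing gs' with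
  | nil => simp [pvSplitOnce] at h
  | cons g rest ih =>
    by_cases hg : 1 < g.length
    · match g, hg with
      | a :: b :: btl, _ =>
        simp [pvSplitOnce] at h
        subst h
        have hm : 1 ≤ (b :: btl).length := by simp
        rw [pvPeel_step d a (b :: btl) rest hm, pvPeel_singleton d [a] ((b :: btl) :: rest) (by simp)]
    · simp [pvSplitOnce, hg] at h
      obtain ⟨rest', hr, he⟩ := h
      subst he
      rw [pvPeel_singleton (d + 1) g rest (by omega), ih rest' hr,
          pvPeel_singleton d g rest' (by omega)]

-- when there is spare capacity, A's inner for-loop finds a split, and it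
-- grows the list by one and uses up one unit of slack
theorem pvSplitOnce_exists (gs : List (List String)) (h : 0 < pvSlack gs) :
    ∃ gs', pvSplitOnce gs = some gs' ∧ gs'.length = gs.length + 1 ∧ pvSlack gs' + 1 = pvSlack gs := by
  induction gs with
  | nil => simp [pvSlack] at h
  | cons g rest ih =>
    by_cases hg : 1 < g.length
    · refine ⟨g.take 1 :: g.drop 1 :: rest, by simp [pvSplitOnce, hg], by simp, ?_⟩
      simp [pvSlack]
      omega
    · have hs : 0 < pvSlack rest := by
        simp [pvSlack] at h ⊢; omega
      obtain ⟨rest', h1, h2, h3⟩ := ih hs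
      refine ⟨g :: rest', by simp [pvSplitOnce, hg, h1], by simp [h2], ?_⟩
      simp [pvSlack] at h3 ⊢
      omega

-- when the count is already ≤ / ≥ the target the loops do nothing
theorem pvSplitLoop_noop (fuel : Nat) (gs : List (List String)) (t : Int)
    (h : ¬ (gs.length : Int) < t) : pvSplitLoop fuel gs t = gs := by
  cases fuel <;> simp [pvSplitLoop, h]

theorem pvMergeLoop_noop (fuel : Nat) (gs : List (List String)) (t : Int)
    (h : ¬ t < (gs.length : Int)) : pvMergeLoop fuel gs t = gs := by
  cases fuel <;> simp [pvMergeLoop, h]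

-- A's split phase computes B's peel, and the length comes out at target
theorem pvSplitLoop_eq (d : Nat) : ∀ (fuel : Nat) (gs : List (List String)) (t : Int),
    t = (gs.length : Int) + d → d ≤ pvSlack gs → d ≤ fuel →
    pvSplitLoop fuel gs t = pvPeel d gs ∧ (pvPeel d gs).length = gs.length + d := by
  induction d with
  | zero =>
    intro fuel gs t ht _ _
    refine ⟨?_, by simp [pvPeel_zero]⟩
    rw [pvSplitLoop_noop fuel gs t (by omega), pvPeel_zero]
  | succ d ih =>
    intro fuel gs t ht hs hf
    obtain ⟨f, rfl⟩ : ∃ f, fuel = f + 1 := ⟨fuel - 1, by omega⟩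
    obtain ⟨gs', h1, h2, h3⟩ := pvSplitOnce_exists gs (by omega)
    have hlt : (gs.length : Int) < t := by push_cast at ht ⊢; omega
    have ht' : t = (gs'.length : Int) + d := by rw [h2]; push_cast at ht ⊢; omega
    have hrec := ih f gs' t ht' (by omega) (by omega)
    have hstep : pvSplitLoop (f + 1) gs t = pvSplitLoop f gs' t := by
      simp only [pvSplitLoop]
      rw [if_pos hlt, h1]
    constructor
    · rw [hstep, hrec.1, pvPeel_splitOnce gs gs' h1 d]
    · rw [pvPeel_splitOnce gs gs' h1 d, hrec.2, h2]
      omega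

-- A's merge phase = flatten the leftmost len−t+1 groups
theorem pvMergeLoop_eq (fuel : Nat) : ∀ (gs : List (List String)) (t : Int),
    1 ≤ t → t ≤ (gs.length : Int) → (gs.length : Int) ≤ (fuel : Int) + t →
    pvMergeLoop fuel gs t
      = ((gs.take ((gs.length : Int) - t + 1).toNat).flatten) :: gs.drop ((gs.length : Int) - t + 1).toNat := by
  induction fuel with
  | zero =>
    intro gs t h1 h2 h3
    have heq : t = (gs.length : Int) := by omega
    cases gs with
    | nil => exfalso; simp at h2; omega
    | cons g rest =>
      have hk : (((g :: rest).length : Int) - t + 1).toNat = 1 := by omega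
      rw [pvMergeLoop_noop 0 (g :: rest) t (by omega), hk]
      simp
  | succ f ih =>
    intro gs t h1 h2 h3
    by_cases hlt : t < (gs.length : Int)
    · match gs with
      | [] => exfalso; simp at hlt; omega
      | [g] => exfalso; simp at hlt; omega
      | g1 :: g2 :: rest =>
        have hstep : pvMergeLoop (f + 1) (g1 :: g2 :: rest) t = pvMergeLoop f ((g1 ++ g2) :: rest) t := by
          simp only [pvMergeLoop]
          rw [if_pos hlt]
        rw [hstep, ih ((g1 ++ g2) :: rest) t h1 (by simp at hlt ⊢; omega) (by simp at h3 ⊢; omega)]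
        have hL : ((((g1 ++ g2) :: rest).length : Int)) = ((g1 :: g2 :: rest).length : Int) - 1 := by
          simp
        rw [hL, show ((g1 :: g2 :: rest).length : Int) - 1 - t + 1
            = ((g1 :: g2 :: rest).length : Int) - t from by ring]
        obtain ⟨m, hm⟩ : ∃ m : Nat, ((g1 :: g2 :: rest).length : Int) - t = (m : Int) + 1 := by
          refine ⟨(((g1 :: g2 :: rest).length : Int) - t - 1).toNat, ?_⟩
          simp at hlt ⊢; omega
        rw [hm, show ((m : Int) + 1).toNat = m + 1 from by omega,
            show ((m : Int) + 1 + 1).toNat = m + 2 from by omega]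
        simp
    · have heq : t = (gs.length : Int) := by omega
      cases gs with
      | nil => exfalso; simp at h2; omega
      | cons g rest =>
        have hk : (((g :: rest).length : Int) - t + 1).toNat = 1 := by omega
        rw [pvMergeLoop_noop (f + 1) (g :: rest) t (by omega), hk]
        simp

-- ===== VERDICT (by name: the statement is the Claim_ definition above) =====
theorem adjust_phoneme_groups_spec : Claim_equal_adjust_phoneme_groups := by
  intro gs t _ hpre
  unfold Spec_adjust_phoneme_groups adjust_phoneme_groups adjust_phoneme_groups_alt
  rcases hpre with ⟨he, ht⟩ | ⟨hne, h1, h2⟩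
  · subst he; subst ht
    simp [pvSplitLoop_noop, pvMergeLoop_noop]
  · by_cases hgt : (gs.length : Int) < t
    · -- split case
      have hd : t = (gs.length : Int) + ((t - (gs.length : Int)).toNat : Int) := by omega
      have hsp := pvSplitLoop_eq (t - (gs.length : Int)).toNat t.toNat gs t hd (by omega) (by omega)
      rw [hsp.1]
      have hlen : ((pvPeel (t - (gs.length : Int)).toNat gs).length : Int) = t := by
        rw [hsp.2]; push_cast; omega
      rw [pvMergeLoop_noop _ _ _ (by omega)]
      simp [hgt]
    · by_cases hlt : t < (gs.length : Int)
      · -- merge case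
        rw [pvSplitLoop_noop _ _ _ hgt,
            pvMergeLoop_eq gs.length gs t h1 (by omega) (by omega)]
        simp [hgt, hlt]
      · -- equal case
        rw [pvSplitLoop_noop _ _ _ hgt, pvMergeLoop_noop _ _ _ hlt]
        simp [hgt, hlt]
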